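-- pv_equiv track=rewrite | github.com/josephrubin/traxler | source/function/search_util.py | fuzzy_in
-- ===== SOURCE A (Python) =====
-- def fuzzy_in(string_one, string_two, thresh=4):
--     """Check if a good number of characters from string_one are in string_two in order."""
--     threshold = min(len(string_one), thresh)
--     match_count = 0
--     last_match_index = -1
--     for i, c in enumerate(string_one):
--         # Optimize: break out if no chance.
--         if match_count + len(string_one) - i < threshold:
--             return False
--         idx = string_two.find(c, last_match_index + 1)
--         if idx != -1:
--             match_count += 1
--             last_match_index = idx
--     return match_count >= threshold
-- ===== SOURCE B (Python) =====
-- def fuzzy_in(string_one, string_two, thresh=4):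
--     """Check if a good number of characters from string_one are in string_two in order."""
--     # Index string_two once: positions of each character, in ascending order.
--     pos = {}
--     for j, ch in enumerate(string_two):
--         pos.setdefault(ch, []).append(j)
--     start = 0
--     match_count = 0
--     for c in string_one:
--         lst = pos.get(c, [])
--         # binary search: first position in lst that is >= start
--         lo, hi = 0, len(lst)
--         while lo < hi:
--             mid = (lo + hi) // 2
--             if lst[mid] < start:
--                 lo = mid + 1
--             else:
--                 hi = mid
--         if lo < len(lst):
--             match_count += 1
--             start = lst[lo] + 1
--     return match_count >= min(len(string_one), thresh)
-- ===== Notes on version B (the rewrite author's own statement) =====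
-- stated objective: alternative
-- what changed: Instead of calling string_two.find for every character of string_one (plus a break-out shortcut), B builds a per-character index of positions in string_two once and answers each in-order query with a binary search over that index, then compares the final count to the threshold.
import Mathlib
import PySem

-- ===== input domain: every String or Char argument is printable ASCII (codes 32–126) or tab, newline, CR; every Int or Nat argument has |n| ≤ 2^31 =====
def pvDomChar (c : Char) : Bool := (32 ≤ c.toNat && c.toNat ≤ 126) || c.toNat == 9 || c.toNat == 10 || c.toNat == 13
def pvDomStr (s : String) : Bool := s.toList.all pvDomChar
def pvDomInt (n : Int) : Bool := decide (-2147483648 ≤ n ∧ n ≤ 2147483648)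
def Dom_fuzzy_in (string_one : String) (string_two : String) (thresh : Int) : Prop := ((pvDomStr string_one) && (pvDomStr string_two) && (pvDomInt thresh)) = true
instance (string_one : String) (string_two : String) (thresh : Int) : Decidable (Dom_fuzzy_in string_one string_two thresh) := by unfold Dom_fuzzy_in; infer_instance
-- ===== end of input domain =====

-- B replaces A's repeated string_two.find scans (and A's break-out shortcut) by a
-- per-character position index of string_two built once and queried with a hand-written
-- binary search (an alternative algorithm over a different data structure).

-- ===== PORT A =====
-- the for-loop of A over enumerate(string_one); state: match_count, last_match_index
def fuzzyLoopA (s2 : List Char) (n thr : Int) : List (Int × Char) → Int → Int → Bool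
  | [], mc, _ => decide (thr ≤ mc)
  | (i, c) :: rest, mc, lmi =>
    if mc + n - i < thr then false
    else
      let idx := PySem.Chars.findFrom s2 [c] (lmi + 1) none
      if idx ≠ -1 then fuzzyLoopA s2 n thr rest (mc + 1) idx
      else fuzzyLoopA s2 n thr rest mc lmi

def fuzzy_in (string_one : String) (string_two : String) (thresh : Int) : Bool :=
  let threshold := min (PySem.Str.len string_one) thresh
  fuzzyLoopA string_two.toList (PySem.Str.len string_one) threshold
    (PySem.List.enumerate string_one.toList 0) 0 (-1)

-- ===== PORT B =====
-- B's hand-written while-loop binary search: first index in lst[lo:hi] with lst[idx] >= start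
def pvBinSearch (lst : List Int) (start : Int) (lo hi : Nat) : Nat :=
  if lo < hi then
    let mid := (lo + hi) / 2
    if lst.getD mid 0 < start then pvBinSearch lst start (mid + 1) hi
    else pvBinSearch lst start lo mid
  else lo
termination_by hi - lo
decreasing_by all_goals omega

-- pos = {}; for j, ch in enumerate(string_two): pos.setdefault(ch, []).append(j)
def pvBuildPos (s2 : List Char) : PySem.Dict Char (List Int) :=
  (PySem.List.enumerate s2 0).foldl (fun d p => d.modify p.2 [] (· ++ [p.1])) PySem.Dict.empty

-- B's for-loop over string_one; state: start, match_count
def fuzzyLoopB (pos : PySem.Dict Char (List Int)) : List Char → Int → Int → Int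
  | [], _, mc => mc
  | c :: rest, start, mc =>
    let lst := pos.getD c []
    let lo := pvBinSearch lst start 0 lst.length
    if lo < lst.length then fuzzyLoopB pos rest (lst.getD lo 0 + 1) (mc + 1)
    else fuzzyLoopB pos rest start mc

def fuzzy_in_alt (string_one : String) (string_two : String) (thresh : Int) : Bool :=
  let pos := pvBuildPos string_two.toList
  decide (min (PySem.Str.len string_one) thresh ≤ fuzzyLoopB pos string_one.toList 0 0)

-- ===== PRECONDITION & SPEC =====
def Spec_fuzzy_in (string_one : String) (string_two : String) (thresh : Int) (out : Bool) : Prop := out = fuzzy_in_alt string_one string_two thresh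
instance (string_one : String) (string_two : String) (thresh : Int) (out : Bool) : Decidable (Spec_fuzzy_in string_one string_two thresh out) := by unfold Spec_fuzzy_in; infer_instance

-- ===== CLAIM (what is proved, stated in full; the proofs are below) =====
def Claim_equal_fuzzy_in : Prop := ∀ (string_one : String) (string_two : String) (thresh : Int), Dom_fuzzy_in string_one string_two thresh → Spec_fuzzy_in string_one string_two thresh (fuzzy_in string_one string_two thresh)

-- ===== LEMMAS AND PROOFS =====

-- the position of the first occurrence of c in s2 at an index ≥ j (the common spec of
-- A's find(c, j) and B's indexed binary search)
def firstAt (s2 : List Char) (c : Char) (j : Nat) : Option Nat :=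
  ((s2.drop j).findIdx? (· == c)).map (j + ·)

-- the greedy in-order match count, the common meaning of both loops
def gcount (s2 : List Char) : List Char → Nat → Nat
  | [], _ => 0
  | c :: rest, j =>
    match firstAt s2 c j with
    | some i => gcount s2 rest (i + 1) + 1
    | none => gcount s2 rest j

theorem gcount_le (s2 : List Char) (l : List Char) (j : Nat) : gcount s2 l j ≤ l.length := by
  induction l generalizing j with
  | nil => simp [gcount]
  | cons c rest ih =>
    cases h : firstAt s2 c j with
    | some i => simp only [gcount, h, List.length_cons]; have := ih (i + 1); omega
    | none => simp only [gcount, h, List.length_cons]; have := ih j; omega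

theorem firstAt_some (s2 : List Char) (c : Char) (j i : Nat) (h : firstAt s2 c j = some i) :
    j ≤ i ∧ i < s2.length ∧ s2[i]? = some c ∧ ∀ k, j ≤ k → k < i → s2[k]? ≠ some c := by
  unfold firstAt at h
  rcases Option.map_eq_some_iff.mp h with ⟨k, hk, rfl⟩
  rcases List.findIdx?_eq_some_iff_getElem.mp hk with ⟨hlt, hp, hmin⟩
  rw [List.getElem_drop] at hp
  have hlen : j + k < s2.length := by
    have := s2.length_drop (i := j); omega
  refine ⟨by omega, hlen, ?_, ?_⟩
  · rw [List.getElem?_eq_getElem hlen]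
    simpa using hp
  · intro m hjm hmk
    have hm2 : m < s2.length := by omega
    have hmk' : m - j < k := by omega
    have hthis := hmin (m - j) hmk'
    have hk2 : m - j < (s2.drop j).length := by
      have := s2.length_drop (i := j); omega
    have e : (s2.drop j)[m - j]? = s2[m]? := by
      rw [List.getElem?_drop]; congr 1; omega
    intro hc
    rw [hc, List.getElem?_eq_getElem hk2] at e
    have : (s2.drop j)[m - j] = c := by
      simpa using e
    exact hthis (by simp [this])

theorem singleton_prefix_iff' (c : Char) (u : List Char) : [c] <+: u ↔ u.head? = some c := by
  cases u with
  | nil => simp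
  | cons a t => simp [List.cons_prefix_iff, eq_comm]

theorem find_singleton (t : List Char) (c : Char) :
    PySem.Chars.find t [c] =
      (match t.findIdx? (· == c) with | some k => (k : Int) | none => -1) := by
  cases hf : t.findIdx? (· == c) with
  | none =>
    have hall := List.findIdx?_eq_none_iff.mp hf
    apply (PySem.Chars.find_eq_neg_one_iff t [c]).mpr
    intro hinf
    have hmem : c ∈ t := List.singleton_sublist.mp hinf.sublist
    have := hall c hmem
    simp at this
  | some k =>
    rcases List.findIdx?_eq_some_iff_getElem.mp hf with ⟨hk, hp, hmin⟩
    have htk : t[k] = c := by simpa using hp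
    have hnn : 0 ≤ PySem.Chars.find t [c] := by
      apply (PySem.Chars.find_nonneg_iff t [c]).mpr
      rcases List.append_of_mem (htk ▸ List.getElem_mem hk) with ⟨u, v, huv⟩
      exact ⟨u, v, by simp [huv]⟩
    obtain ⟨hpre, hmn⟩ := PySem.Chars.find_spec hnn
    have h1 : t[(PySem.Chars.find t [c]).toNat]? = some c := by
      rw [← List.head?_drop]
      exact (singleton_prefix_iff' c _).mp hpre
    obtain ⟨hflen, hfc⟩ := List.getElem?_eq_some_iff.mp h1
    have hkf : k = (PySem.Chars.find t [c]).toNat := by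
      rcases Nat.lt_trichotomy k (PySem.Chars.find t [c]).toNat with h | h | h
      · have hpk : [c] <+: t.drop k := by
          apply (singleton_prefix_iff' c _).mpr
          rw [List.head?_drop, List.getElem?_eq_getElem hk, htk]
        exact absurd hpk (hmn k h)
      · exact h
      · exact absurd (by simp [hfc]) (hmin _ h)
    have := Int.toNat_of_nonneg hnn
    show PySem.Chars.find t [c] = (k : Int)
    omega

-- A's find(c, j) computes firstAt
theorem findFrom_eq_firstAt (s2 : List Char) (c : Char) (j : Nat) (hj : j ≤ s2.length) :
    PySem.Chars.findFrom s2 [c] (j : Int) none =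
      (match firstAt s2 c j with | some i => (i : Int) | none => -1) := by
  rw [PySem.Chars.findFrom_natCast s2 [c] j hj, find_singleton]
  unfold firstAt
  cases hf : (s2.drop j).findIdx? (· == c) with
  | none => simp
  | some k =>
    have : ((k : Int)) ≠ -1 := by omega
    simp [this]

-- converses of firstAt_some / firstAt_none
theorem firstAt_eq_some (s2 : List Char) (c : Char) (j i : Nat) (hji : j ≤ i)
    (hi : i < s2.length) (hc : s2[i]? = some c)
    (hmin : ∀ k, j ≤ k → k < i → s2[k]? ≠ some c) : firstAt s2 c j = some i := by
  unfold firstAt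
  have hlen : i - j < (s2.drop j).length := by
    have := s2.length_drop (i := j); omega
  have hidx : (s2.drop j).findIdx? (· == c) = some (i - j) := by
    apply List.findIdx?_eq_some_iff_getElem.mpr
    refine ⟨hlen, ?_, ?_⟩
    · have e : (s2.drop j)[i - j]? = s2[i]? := by
        rw [List.getElem?_drop]; congr 1; omega
      rw [hc, List.getElem?_eq_getElem hlen] at e
      simpa using e
    · intro m hm
      have hm2 : j + m < i := by omega
      have hm3 : j + m < s2.length := by omega
      have e : (s2.drop j)[m]? = s2[j + m]? := List.getElem?_drop ..
      have hne := hmin (j + m) (by omega) hm2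
      intro hcontra
      apply hne
      rw [← e, List.getElem?_eq_getElem (by omega)]
      simpa using hcontra
  rw [hidx]
  simp
  omega

theorem firstAt_eq_none (s2 : List Char) (c : Char) (j : Nat)
    (h : ∀ k, j ≤ k → k < s2.length → s2[k]? ≠ some c) : firstAt s2 c j = none := by
  unfold firstAt
  rw [List.findIdx?_eq_none_iff.mpr]
  · rfl
  · intro x hx
    rcases List.mem_iff_getElem.mp hx with ⟨m, hm, rfl⟩
    have hm2 : j + m < s2.length := by
      have := s2.length_drop (i := j); omega
    have e : (s2.drop j)[m]? = s2[j + m]? := List.getElem?_drop ..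
    have hne := h (j + m) (by omega) hm2
    simp only [List.getElem?_eq_getElem hm, List.getElem?_eq_getElem hm2] at e
    have he : (s2.drop j)[m] = s2[j + m] := Option.some_inj.mp e
    rw [he, beq_eq_false_iff_ne]
    intro hcc
    exact hne (by rw [List.getElem?_eq_getElem hm2, hcc])

-- the index that B builds, per character
theorem foldl_modify_getD (l : List (Int × Char)) (d : PySem.Dict Char (List Int)) (c : Char) :
    (l.foldl (fun d p => d.modify p.2 [] (· ++ [p.1])) d).getD c [] =
      d.getD c [] ++ (l.filter (fun p => p.2 == c)).map (·.1) := by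
  induction l generalizing d with
  | nil => simp
  | cons p rest ih =>
    simp only [List.foldl_cons, List.filter_cons]
    rw [ih]
    by_cases h : p.2 = c
    · rw [PySem.Dict.getD_modify]
      simp [h]
    · rw [PySem.Dict.getD_modify]
      simp [h, Ne.symm h]

theorem buildPos_getD (s2 : List Char) (c : Char) :
    (pvBuildPos s2).getD c [] =
      ((PySem.List.enumerate s2 0).filter (fun p => p.2 == c)).map (·.1) := by
  unfold pvBuildPos
  rw [foldl_modify_getD]
  simp

theorem getD_mono (lst : List Int) (hs : lst.Pairwise (· ≤ ·)) (a b : Nat) (hab : a ≤ b)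
    (hb : b < lst.length) : lst.getD a 0 ≤ lst.getD b 0 := by
  rcases Nat.eq_or_lt_of_le hab with rfl | h
  · exact le_refl _
  · rw [List.getD_eq_getElem _ _ (by omega), List.getD_eq_getElem _ _ hb]
    exact List.pairwise_iff_getElem.mp hs a b (by omega) hb h

theorem binSearch_spec (lst : List Int) (x : Int) (lo hi : Nat) (hs : lst.Pairwise (· ≤ ·))
    (hlh : lo ≤ hi) (hhi : hi ≤ lst.length)
    (hl : ∀ k, k < lo → lst.getD k 0 < x)
    (hr : ∀ k, hi ≤ k → k < lst.length → ¬ lst.getD k 0 < x) :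
    (∀ k, k < pvBinSearch lst x lo hi → lst.getD k 0 < x) ∧
    (∀ k, pvBinSearch lst x lo hi ≤ k → k < lst.length → ¬ lst.getD k 0 < x) ∧
    pvBinSearch lst x lo hi ≤ lst.length := by
  revert hlh hhi hl hr
  induction lo, hi using pvBinSearch.induct (lst := lst) (start := x) with
  | case1 lo hi h mid hless ih =>
    intro hlh hhi hl hr
    rw [pvBinSearch, if_pos h, if_pos (show lst.getD ((lo + hi) / 2) 0 < x from hless)]
    apply ih (by omega) hhi
    · intro k hk
      have hmidlt : (lo + hi) / 2 < lst.length := by omega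
      rcases Nat.lt_or_ge k lo with h2 | h2
      · exact hl k h2
      · exact lt_of_le_of_lt (getD_mono lst hs k ((lo + hi) / 2) (by omega) hmidlt) hless
    · exact hr
  | case2 lo hi h mid hless ih =>
    intro hlh hhi hl hr
    rw [pvBinSearch, if_pos h, if_neg (show ¬ lst.getD ((lo + hi) / 2) 0 < x from hless)]
    apply ih (by omega) (by omega) hl
    intro k hk hklen hcontra
    exact hless (lt_of_le_of_lt (getD_mono lst hs ((lo + hi) / 2) k hk hklen) hcontra)
  | case3 lo hi h =>
    intro hlh hhi hl hr
    rw [pvBinSearch, if_neg h]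
    exact ⟨fun k hk => hl k hk, fun k hk hklen => hr k (by omega) hklen, by omega⟩

-- B's indexed binary-search query computes firstAt too
theorem query_eq_firstAt (s2 : List Char) (c : Char) (j : Nat) (L : List Int)
    (hL : L = ((PySem.List.enumerate s2 0).filter (fun p => p.2 == c)).map (·.1)) :
    (if pvBinSearch L (j : Int) 0 L.length < L.length
     then some (L.getD (pvBinSearch L (j : Int) 0 L.length) 0) else none) =
      (firstAt s2 c j).map (fun i => (i : Int)) := by
  have hpl : L.Pairwise (· ≤ ·) := by
    rw [hL]
    apply List.pairwise_map.mpr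
    apply List.Pairwise.filter
    exact (PySem.List.pairwise_lt_enumerate s2 0).imp (fun h => le_of_lt h)
  have hmem : ∀ v : Int, v ∈ L ↔ ∃ k : Nat, k < s2.length ∧ v = (k : Int) ∧ s2[k]? = some c := by
    intro v
    rw [hL]
    simp only [List.mem_map, List.mem_filter]
    constructor
    · rintro ⟨p, ⟨hpmem, hpc⟩, rfl⟩
      rw [PySem.List.mem_enumerate_iff] at hpmem
      rcases hpmem with ⟨k, hk, rfl⟩
      refine ⟨k, hk, by simp, ?_⟩
      rw [List.getElem?_eq_getElem hk]
      simpa using hpc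
    · rintro ⟨k, hk, rfl, hck⟩
      have hc2 : s2[k] = c := by
        have := List.getElem?_eq_getElem hk
        rw [hck] at this
        exact (Option.some_inj.mp this).symm
      refine ⟨((k : Int), s2[k]), ⟨?_, by simp [hc2]⟩, rfl⟩
      rw [PySem.List.mem_enumerate_iff]
      exact ⟨k, hk, by simp⟩
  obtain ⟨hlt, hge, hle⟩ := binSearch_spec L (j : Int) 0 L.length hpl (Nat.zero_le _)
    (le_refl _) (fun k hk => absurd hk (Nat.not_lt_zero k))
    (fun k hk hk2 => absurd hk2 (not_lt.mpr hk))
  by_cases hr : pvBinSearch L (j : Int) 0 L.length < L.length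
  · rw [if_pos hr]
    have hvmem : L.getD (pvBinSearch L (j : Int) 0 L.length) 0 ∈ L := by
      rw [List.getD_eq_getElem _ _ hr]
      exact List.getElem_mem _
    obtain ⟨k, hk, hveq, hck⟩ := (hmem _).mp hvmem
    have hjk : (j : Int) ≤ (k : Int) := by
      have := hge _ (le_refl _) hr
      omega
    have hfa : firstAt s2 c j = some k := by
      apply firstAt_eq_some _ _ _ _ (by exact_mod_cast hjk) hk hck
      intro m hjm hmk hmc
      have hmmem : ((m : Int)) ∈ L := (hmem _).mpr ⟨m, by omega, rfl, hmc⟩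
      obtain ⟨p, hp, hpe⟩ := List.mem_iff_getElem.mp hmmem
      have hpr : pvBinSearch L (j : Int) 0 L.length ≤ p := by
        by_contra hcon
        have := hlt p (by omega)
        rw [List.getD_eq_getElem _ _ hp, hpe] at this
        omega
      have hmono := getD_mono L hpl _ p hpr hp
      rw [List.getD_eq_getElem _ _ hp, hpe] at hmono
      omega
    rw [hfa, hveq]
    rfl
  · rw [if_neg hr]
    have hfa : firstAt s2 c j = none := by
      apply firstAt_eq_none
      intro k hjk hk hkc
      have hkm : ((k : Int)) ∈ L := (hmem _).mpr ⟨k, hk, rfl, hkc⟩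
      obtain ⟨p, hp, hpe⟩ := List.mem_iff_getElem.mp hkm
      have := hlt p (by omega)
      rw [List.getD_eq_getElem _ _ hp, hpe] at this
      omega
    rw [hfa]
    rfl

-- B's loop computes the greedy count
theorem loopB_eq (s2 : List Char) (l : List Char) (j : Nat) (mc : Int) :
    fuzzyLoopB (pvBuildPos s2) l (j : Int) mc = mc + gcount s2 l j := by
  induction l generalizing j mc with
  | nil => simp [fuzzyLoopB, gcount]
  | cons c rest ih =>
    simp only [fuzzyLoopB]
    have hq := query_eq_firstAt s2 c j ((pvBuildPos s2).getD c []) (buildPos_getD s2 c)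
    cases hfa : firstAt s2 c j with
    | some i =>
      rw [hfa] at hq
      by_cases hcond : pvBinSearch ((pvBuildPos s2).getD c []) (j : Int) 0
          ((pvBuildPos s2).getD c []).length < ((pvBuildPos s2).getD c []).length
      · rw [if_pos hcond] at hq ⊢
        have hv : ((pvBuildPos s2).getD c []).getD
            (pvBinSearch ((pvBuildPos s2).getD c []) (j : Int) 0
              ((pvBuildPos s2).getD c []).length) 0 = (i : Int) :=
          Option.some_inj.mp hq
        rw [hv, show ((i : Int) + 1) = ((i + 1 : Nat) : Int) by push_cast; ring, ih (i + 1) (mc + 1)]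
        simp only [gcount, hfa]
        push_cast
        ring
      · rw [if_neg hcond] at hq
        exact absurd hq (by simp)
    | none =>
      rw [hfa] at hq
      by_cases hcond : pvBinSearch ((pvBuildPos s2).getD c []) (j : Int) 0
          ((pvBuildPos s2).getD c []).length < ((pvBuildPos s2).getD c []).length
      · rw [if_pos hcond] at hq
        exact absurd hq (by simp)
      · rw [if_neg hcond, ih j mc]
        simp only [gcount, hfa]

-- A's loop decides the greedy count against the threshold (the break returns False only
-- when the final count provably cannot reach it)
theorem loopA_eq (s2 : List Char) (n thr : Int) (l : List Char) (i0 j : Nat) (mc : Int)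
    (hj : j ≤ s2.length) (hn : n = (i0 : Int) + l.length) :
    fuzzyLoopA s2 n thr (PySem.List.enumerate l (i0 : Int)) mc ((j : Int) - 1) =
      decide (thr ≤ mc + gcount s2 l j) := by
  induction l generalizing i0 j mc with
  | nil => simp [PySem.List.enumerate, fuzzyLoopA, gcount]
  | cons c rest ih =>
    rw [PySem.List.enumerate_cons]
    simp only [fuzzyLoopA]
    by_cases hbr : mc + n - (i0 : Int) < thr
    · rw [if_pos hbr]
      have hgle := gcount_le s2 (c :: rest) j
      symm
      rw [decide_eq_false_iff_not]
      simp only [List.length_cons] at hn hgle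
      push_cast at hn
      omega
    · rw [if_neg hbr]
      have hj1 : ((j : Int) - 1 + 1) = (j : Int) := by ring
      have hi0 : ((i0 : Int) + 1) = ((i0 + 1 : Nat) : Int) := by push_cast; ring
      have hn' : n = ((i0 + 1 : Nat) : Int) + (rest.length : Int) := by
        simp only [List.length_cons] at hn
        push_cast at hn ⊢
        omega
      cases hfa : firstAt s2 c j with
      | some i =>
        obtain ⟨hji, hilen, _, _⟩ := firstAt_some s2 c j i hfa
        have hff : PySem.Chars.findFrom s2 [c] ((j : Int) - 1 + 1) none = (i : Int) := by
          rw [hj1, findFrom_eq_firstAt s2 c j hj, hfa]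
        have hne : ((i : Int)) ≠ -1 := by omega
        rw [hff, if_pos hne]
        have hi1 : ((i : Int)) = ((i + 1 : Nat) : Int) - 1 := by push_cast; ring
        rw [hi1, hi0, ih (i0 + 1) (i + 1) (mc + 1) (by omega) hn']
        simp only [gcount, hfa]
        rw [decide_eq_decide]
        push_cast
        omega
      | none =>
        have hff : PySem.Chars.findFrom s2 [c] ((j : Int) - 1 + 1) none = -1 := by
          rw [hj1, findFrom_eq_firstAt s2 c j hj, hfa]
        rw [hff, if_neg (by simp : ¬ ((-1 : Int) ≠ -1)), hi0, ih (i0 + 1) j mc hj hn']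
        simp only [gcount, hfa]

-- ===== VERDICT (by name: the statement is the Claim_ definition above) =====
theorem fuzzy_in_spec : Claim_equal_fuzzy_in := by
  intro s1 s2 thr _
  unfold Spec_fuzzy_in
  simp only [fuzzy_in, fuzzy_in_alt]
  have hA := loopA_eq s2.toList (PySem.Str.len s1) (min (PySem.Str.len s1) thr)
    s1.toList 0 0 0 (Nat.zero_le _) (by simp [PySem.Str.len])
  have hB := loopB_eq s2.toList s1.toList 0 0
  simp only [Nat.cast_zero, zero_add, zero_sub] at hA hB
  rw [hA, hB]
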